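-- pv_equiv track=rewrite | github.com/rsliu-225/wrs | 0002_rs/log/exp/show_penframe.py | path_padding
-- ===== SOURCE A (Python) =====
-- def path_padding(path, mask):
--     path_new = []
--     path_index = 0
--     for i, v in enumerate(mask):
--         if v:
--             try:
--                 path_new.append(path[path_index])
--                 path_index += 1
--             except:
--                 path_new.append(None)
--         else:
--             path_new.append(None)
--     return path_new
-- ===== SOURCE B (Python) =====
-- def path_padding(path, mask):
--     positions = [i for i, v in enumerate(mask) if v]
--     result = [None] * len(mask)
--     for pos, val in zip(positions, path):
--         result[pos] = val
--     return result
-- ===== Notes on version B (the rewrite author's own statement) =====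
-- stated objective: idiomatic
-- what changed: Instead of A's single loop with a running cursor and a try/except over path[path_index], B preallocates a None-filled result, lists the True positions once, and scatters path values into them with zip (which stops at the shorter sequence, so exhausted path naturally leaves None).
import Mathlib
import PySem

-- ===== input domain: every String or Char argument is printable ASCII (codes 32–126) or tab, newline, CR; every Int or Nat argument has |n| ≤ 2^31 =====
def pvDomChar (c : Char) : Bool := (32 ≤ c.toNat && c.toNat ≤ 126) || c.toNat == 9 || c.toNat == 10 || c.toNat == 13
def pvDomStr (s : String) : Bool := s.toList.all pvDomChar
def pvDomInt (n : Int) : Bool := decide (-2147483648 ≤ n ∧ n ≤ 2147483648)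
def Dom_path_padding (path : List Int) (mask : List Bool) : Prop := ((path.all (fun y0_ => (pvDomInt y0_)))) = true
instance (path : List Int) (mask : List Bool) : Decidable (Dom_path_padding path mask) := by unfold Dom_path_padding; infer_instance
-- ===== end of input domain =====

-- ===== PORT A =====
-- A walks mask with a cursor into path, appending path[cursor] (or None once exhausted).
def path_padding (path : List Int) (mask : List Bool) : List (Option Int) :=
  (mask.foldl (fun (st : List (Option Int) × Nat) v =>
      if v then
        match PySem.List.pyGet? path (st.2 : Int) with
        | some x => (st.1 ++ [some x], st.2 + 1)
        | none   => (st.1 ++ [none], st.2)      -- bare except: append None, cursor unchanged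
      else (st.1 ++ [none], st.2)) ([], 0)).1

-- ===== PORT B =====
-- B: list the True positions, preallocate None, scatter path values via zip.
-- [i for i, v in enumerate(mask) if v]  (indices are the nonnegative enumerate counter, so Nat is exact)
def bPositions : List Bool → Nat → List Nat
  | [], _ => []
  | v :: m, i => if v then i :: bPositions m (i + 1) else bPositions m (i + 1)

def path_padding_alt (path : List Int) (mask : List Bool) : List (Option Int) :=
  let positions := bPositions mask 0
  let result := List.replicate mask.length (none : Option Int)
  ((positions.zip path).foldl (fun r pv => r.set pv.1 (some pv.2)) result)

-- ===== PRECONDITION & SPEC =====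
def Spec_path_padding (path : List Int) (mask : List Bool) (out : List (Option Int)) : Prop := out = path_padding_alt path mask
instance (path : List Int) (mask : List Bool) (out : List (Option Int)) : Decidable (Spec_path_padding path mask out) := by unfold Spec_path_padding; infer_instance

-- ===== CLAIM (what is proved, stated in full; the proofs are below) =====
def Claim_equal_path_padding : Prop := ∀ (path : List Int) (mask : List Bool), Dom_path_padding path mask → Spec_path_padding path mask (path_padding path mask)

-- ===== LEMMAS AND PROOFS =====

-- Common reference shape: consume path values at True positions, None once exhausted.
def fSpec : List Int → List Bool → List (Option Int)
  | _, [] => []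
  | p, true :: m =>
      match p with
      | [] => none :: fSpec [] m
      | x :: xs => some x :: fSpec xs m
  | p, false :: m => none :: fSpec p m

theorem aLoop_eq (path : List Int) (mask : List Bool) :
    ∀ (acc : List (Option Int)) (k : Nat),
      (mask.foldl (fun (st : List (Option Int) × Nat) v =>
        if v then
          match PySem.List.pyGet? path (st.2 : Int) with
          | some x => (st.1 ++ [some x], st.2 + 1)
          | none   => (st.1 ++ [none], st.2)
        else (st.1 ++ [none], st.2)) (acc, k)).1 = acc ++ fSpec (path.drop k) mask := by
  induction mask with
  | nil => intro acc k; simp [fSpec]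
  | cons v m ih =>
    intro acc k
    cases v with
    | false => simp only [List.foldl_cons, if_neg Bool.false_ne_true, ih, fSpec]
               simp
    | true =>
      have hget : PySem.List.pyGet? path (k : Int) = (path.drop k).head? := by
        simp [PySem.List.pyGet?_natCast]
      cases hd : path.drop k with
      | nil =>
        simp only [List.foldl_cons, if_true, hget, hd, ih]
        simp [hd, fSpec]
      | cons x xs =>
        have hd1 : path.drop (k + 1) = xs := by
          rw [← List.tail_drop, hd]; rfl
        simp only [List.foldl_cons, if_true, hget, hd, List.head?_cons, ih, fSpec]
        simp [hd1]

theorem fSpec_nil (m : List Bool) : fSpec [] m = List.replicate m.length none := by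
  induction m with
  | nil => rfl
  | cons v m ih => cases v <;> simp [fSpec, ih, List.replicate_succ]

theorem bPositions_succ (m : List Bool) : ∀ i, bPositions m (i + 1) = (bPositions m i).map (· + 1) := by
  induction m with
  | nil => intro i; rfl
  | cons v m ih => intro i; cases v <;> simp [bPositions, ih]

theorem scatter_shift (l : List (Nat × Int)) :
    ∀ (x : Option Int) (rest : List (Option Int)),
      (l.map (fun pv => (pv.1 + 1, pv.2))).foldl (fun r pv => r.set pv.1 (some pv.2)) (x :: rest)
        = x :: l.foldl (fun r pv => r.set pv.1 (some pv.2)) rest := by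
  induction l with
  | nil => intro x rest; rfl
  | cons p l ih => intro x rest; simp [List.set, ih]

theorem bScatter_eq (mask : List Bool) :
    ∀ (path : List Int),
      ((bPositions mask 0).zip path).foldl (fun r pv => r.set pv.1 (some pv.2))
        (List.replicate mask.length (none : Option Int)) = fSpec path mask := by
  induction mask with
  | nil => intro path; simp [bPositions, fSpec]
  | cons v m ih =>
    intro path
    have hzipmap : ∀ ps : List Nat,
        (ps.map (· + 1)).zip path = (ps.zip path).map (fun pv => (pv.1 + 1, pv.2)) := by
      intro ps
      rw [List.zip_map_left]
      rfl
    cases v with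
    | false =>
      simp only [bPositions, if_neg Bool.false_ne_true, bPositions_succ,
        List.length_cons, List.replicate_succ, hzipmap, scatter_shift, ih, fSpec]
    | true =>
      cases path with
      | nil =>
        simp [bPositions, fSpec, fSpec_nil, List.replicate_succ]
      | cons x xs =>
        simp only [bPositions, if_true, bPositions_succ, List.length_cons,
          List.replicate_succ, List.zip_cons_cons, List.foldl_cons, List.set_cons_zero, fSpec]
        rw [show (List.map (fun n => n + 1) (bPositions m 0)).zip xs
              = ((bPositions m 0).zip xs).map (fun pv => (pv.1 + 1, pv.2)) by
            rw [List.zip_map_left]; rfl]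
        rw [scatter_shift, ih]

-- ===== VERDICT (by name: the statement is the Claim_ definition above) =====
theorem path_padding_spec : Claim_equal_path_padding := by
  intro path mask _
  unfold Spec_path_padding path_padding path_padding_alt
  rw [aLoop_eq path mask [] 0, bScatter_eq]
  simp
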